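-- pv_equiv track=rewrite | github.com/tnt305/Sport-Highlight- | src/task/soccernet2item.py | generate_time_pairs
-- ===== SOURCE A (Python) =====
-- def generate_time_pairs(duration, start_minute=0, min_duration=10, audio_pre=10, audio_post=20, seconds_per_segment=60, max_segments=None):
--     """Tạo danh sách cặp (start, end) cho video và audio, giới hạn số segment."""
--     pairs = []
--     current = start_minute
--     segment_count = 0
--
--     while current * seconds_per_segment < duration:
--         if max_segments is not None and segment_count >= max_segments:
--             break
--
--         video_start = current * seconds_per_segment
--         video_end = min((current + 1) * seconds_per_segment, duration)
--         video_length = video_end - video_start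
--
--         if video_length >= min_duration:
--             audio_start = max(0, video_start - audio_pre)
--             audio_end = min(duration, video_end + audio_post)
--             pairs.append({
--                 'video': (video_start, video_end),
--                 'audio': (audio_start, audio_end)
--             })
--             segment_count += 1
--
--         current += 1
--
--     return pairs
-- ===== SOURCE B (Python) =====
-- def generate_time_pairs(duration, start_minute=0, min_duration=10, audio_pre=10, audio_post=20, seconds_per_segment=60, max_segments=None):
--     """Closed-form: split the remaining span into q full windows plus an
--     r-second remainder by divmod, decide qualification arithmetically
--     (full windows qualify iff seconds_per_segment >= min_duration, the
--     remainder iff r >= min_duration), apply the segment cap to the counts,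
--     and only then materialise the kept indices and their dicts."""
--     sps = seconds_per_segment
--     span = duration - start_minute * sps
--     if span <= 0:
--         return []
--     q, r = divmod(span, sps)
--     n_full = q if sps >= min_duration else 0
--     has_tail = r != 0 and r >= min_duration
--     if max_segments is not None:
--         cap = max(0, max_segments)
--         n_full = min(n_full, cap)
--         has_tail = has_tail and n_full < cap
--     kept = list(range(start_minute, start_minute + n_full))
--     if has_tail:
--         kept.append(start_minute + q)
--     return [{'video': (c * sps, min((c + 1) * sps, duration)),
--              'audio': (max(0, c * sps - audio_pre),
--                        min(duration, min((c + 1) * sps, duration) + audio_post))}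
--             for c in kept]
-- ===== Notes on version B (the rewrite author's own statement) =====
-- stated objective: alternative
-- what changed: Replaces A's counting while-loop with break by a closed-form divmod decomposition: the remaining span splits into q full windows plus an r-second remainder, qualification is decided arithmetically per block (full windows iff seconds_per_segment >= min_duration, remainder iff r >= min_duration), the kept index list is sliced to the cap, and the dicts are built in one final map.
-- outside the precondition, e.g. on generate_time_pairs(5, 0, -5, 0, 0, -1, 1): A returns [{'video': (0, -1), 'audio': (0, -1)}], B returns []; on generate_time_pairs(5, 0, 0, 0, 0, 0, 1): A returns [{'video': (0, 0), 'audio': (0, 0)}], B raises ZeroDivisionError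
import Mathlib
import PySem

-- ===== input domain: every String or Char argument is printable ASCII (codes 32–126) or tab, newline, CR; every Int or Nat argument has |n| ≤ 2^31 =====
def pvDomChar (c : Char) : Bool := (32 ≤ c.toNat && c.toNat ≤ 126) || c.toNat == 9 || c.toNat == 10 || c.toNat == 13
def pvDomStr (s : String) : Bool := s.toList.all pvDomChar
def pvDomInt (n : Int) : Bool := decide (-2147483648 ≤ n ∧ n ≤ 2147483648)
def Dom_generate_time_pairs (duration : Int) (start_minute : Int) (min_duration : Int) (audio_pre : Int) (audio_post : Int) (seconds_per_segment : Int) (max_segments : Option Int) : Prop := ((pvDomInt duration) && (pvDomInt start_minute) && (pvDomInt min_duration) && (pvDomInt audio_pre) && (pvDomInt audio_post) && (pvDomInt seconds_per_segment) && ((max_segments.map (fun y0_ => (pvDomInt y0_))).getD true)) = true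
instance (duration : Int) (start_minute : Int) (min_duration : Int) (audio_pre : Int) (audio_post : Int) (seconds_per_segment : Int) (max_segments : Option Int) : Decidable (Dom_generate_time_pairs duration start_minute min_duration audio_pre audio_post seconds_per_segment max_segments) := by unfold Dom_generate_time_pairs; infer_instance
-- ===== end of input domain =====

-- B replaces A's counting while-loop (with mid-loop break) by a closed-form divmod decomposition of the
-- remaining span into q full windows plus an r-second remainder, arithmetic qualification per block,
-- slicing the kept index list to the cap, and one final map building the dicts (alternative decomposition).

-- ===== PORT A =====
-- A's while-loop, fuel-based; (duration - start*sps).toNat + 1 bounds the iteration count whenever the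
-- Python loop terminates on inputs admitted by Pre_ (positive seconds_per_segment, or no iteration at all).
def gtpLoopA (duration : Int) (min_duration : Int) (audio_pre : Int) (audio_post : Int)
    (sps : Int) (max_segments : Option Int) :
    Nat → Int → Int → List (List (String × Int × Int)) → List (List (String × Int × Int))
  | 0, _, _, pairs => pairs
  | fuel + 1, current, segment_count, pairs =>
    if current * sps < duration then
      if (match max_segments with | some m => decide (segment_count ≥ m) | none => false) then
        pairs
      else
        let video_start := current * sps
        let video_end := min ((current + 1) * sps) duration
        let video_length := video_end - video_start
        if video_length ≥ min_duration then
          gtpLoopA duration min_duration audio_pre audio_post sps max_segments fuel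
            (current + 1) (segment_count + 1)
            (pairs ++ [[("video", (video_start, video_end)),
                        ("audio", (max 0 (video_start - audio_pre), min duration (video_end + audio_post)))]])
        else
          gtpLoopA duration min_duration audio_pre audio_post sps max_segments fuel
            (current + 1) segment_count pairs
    else pairs

def generate_time_pairs (duration : Int) (start_minute : Int) (min_duration : Int) (audio_pre : Int) (audio_post : Int) (seconds_per_segment : Int) (max_segments : Option Int) : List (List (String × Int × Int)) :=
  gtpLoopA duration min_duration audio_pre audio_post seconds_per_segment max_segments
    ((duration - start_minute * seconds_per_segment).toNat + 1) start_minute 0 []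

-- ===== PORT B =====
-- B's dict builder for one kept index (the final list comprehension's body)
def gtpBuild (duration : Int) (audio_pre : Int) (audio_post : Int) (sps : Int) (c : Int) :
    List (String × Int × Int) :=
  [("video", (c * sps, min ((c + 1) * sps) duration)),
   ("audio", (max 0 (c * sps - audio_pre), min duration (min ((c + 1) * sps) duration + audio_post)))]

def generate_time_pairs_alt (duration : Int) (start_minute : Int) (min_duration : Int) (audio_pre : Int) (audio_post : Int) (seconds_per_segment : Int) (max_segments : Option Int) : List (List (String × Int × Int)) :=
  let sps := seconds_per_segment
  let span := duration - start_minute * sps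
  if span ≤ 0 then []
  else
    let q := PySem.Int.floordiv span sps
    let r := PySem.Int.mod span sps
    let nfull0 : Int := if sps ≥ min_duration then q else 0
    let tail0 : Bool := decide (r ≠ 0 ∧ r ≥ min_duration)
    let nfull : Int := match max_segments with
      | none => nfull0
      | some m => min nfull0 (max 0 m)
    let tail : Bool := match max_segments with
      | none => tail0
      | some m => tail0 && decide (nfull < max 0 m)
    let kept : List Int :=
      (List.range nfull.toNat).map (fun (i : Nat) => start_minute + (i : Int))
        ++ (if tail then [start_minute + q] else [])
    kept.map (gtpBuild duration audio_pre audio_post sps)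

-- ===== PRECONDITION & SPEC =====
-- Pre_ excludes nonpositive seconds_per_segment with span still remaining: there A either loops forever
-- or (only when a cap and a permissive min_duration let degenerate zero/negative-length windows count)
-- returns cap-many degenerate windows — an artefact of the break; B raises ZeroDivisionError or returns [].
def Pre_generate_time_pairs (duration : Int) (start_minute : Int) (min_duration : Int) (audio_pre : Int) (audio_post : Int) (seconds_per_segment : Int) (max_segments : Option Int) : Prop :=
  0 < seconds_per_segment ∨ duration ≤ start_minute * seconds_per_segment
instance (duration : Int) (start_minute : Int) (min_duration : Int) (audio_pre : Int) (audio_post : Int) (seconds_per_segment : Int) (max_segments : Option Int) : Decidable (Pre_generate_time_pairs duration start_minute min_duration audio_pre audio_post seconds_per_segment max_segments) := by unfold Pre_generate_time_pairs; infer_instance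

def pvWitness_generate_time_pairs : Int × Int × Int × Int × Int × Int × Option Int := (120, 0, 10, 10, 20, 60, none)

def Spec_generate_time_pairs (duration : Int) (start_minute : Int) (min_duration : Int) (audio_pre : Int) (audio_post : Int) (seconds_per_segment : Int) (max_segments : Option Int) (out : List (List (String × Int × Int))) : Prop := out = generate_time_pairs_alt duration start_minute min_duration audio_pre audio_post seconds_per_segment max_segments
instance (duration : Int) (start_minute : Int) (min_duration : Int) (audio_pre : Int) (audio_post : Int) (seconds_per_segment : Int) (max_segments : Option Int) (out : List (List (String × Int × Int))) : Decidable (Spec_generate_time_pairs duration start_minute min_duration audio_pre audio_post seconds_per_segment max_segments out) := by unfold Spec_generate_time_pairs; infer_instance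

-- ===== CLAIM =====
def Claim_equal_generate_time_pairs : Prop := ∀ (duration : Int) (start_minute : Int) (min_duration : Int) (audio_pre : Int) (audio_post : Int) (seconds_per_segment : Int) (max_segments : Option Int), Dom_generate_time_pairs duration start_minute min_duration audio_pre audio_post seconds_per_segment max_segments → Pre_generate_time_pairs duration start_minute min_duration audio_pre audio_post seconds_per_segment max_segments → Spec_generate_time_pairs duration start_minute min_duration audio_pre audio_post seconds_per_segment max_segments (generate_time_pairs duration start_minute min_duration audio_pre audio_post seconds_per_segment max_segments)

-- ===== LEMMAS AND PROOFS =====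

-- proof-side view of A's loop: candidate indices and the per-candidate optional pair
def gtpCand (duration : Int) (sps : Int) : Nat → Int → List Int
  | 0, _ => []
  | fuel + 1, current =>
    if current * sps < duration then current :: gtpCand duration sps fuel (current + 1)
    else []

def gtpPair (duration : Int) (min_duration : Int) (audio_pre : Int) (audio_post : Int)
    (sps : Int) (c : Int) : Option (List (String × Int × Int)) :=
  if min ((c + 1) * sps) duration - c * sps ≥ min_duration then
    some (gtpBuild duration audio_pre audio_post sps c)
  else none

-- A's loop without a cap = filterMap of gtpPair over the candidate list, appended to the accumulator
theorem gtpLoopA_none (duration min_duration audio_pre audio_post sps : Int) :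
    ∀ (fuel : Nat) (current segment_count : Int) (pairs : List (List (String × Int × Int))),
    gtpLoopA duration min_duration audio_pre audio_post sps none fuel current segment_count pairs
      = pairs ++ (gtpCand duration sps fuel current).filterMap
          (gtpPair duration min_duration audio_pre audio_post sps) := by
  intro fuel
  induction fuel with
  | zero => intro current segment_count pairs; simp [gtpLoopA, gtpCand]
  | succ n ih =>
    intro current segment_count pairs
    by_cases h : current * sps < duration
    · by_cases hq : min ((current + 1) * sps) duration - current * sps ≥ min_duration
      · simp [gtpLoopA, gtpCand, gtpPair, gtpBuild, h, hq, ih]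
      · simp [gtpLoopA, gtpCand, gtpPair, h, hq, ih]
    · simp [gtpLoopA, gtpCand, h]

-- A's loop with cap m = the first (m - segment_count).toNat elements of the same filterMap
theorem gtpLoopA_some (duration min_duration audio_pre audio_post sps m : Int) :
    ∀ (fuel : Nat) (current segment_count : Int) (pairs : List (List (String × Int × Int))),
    gtpLoopA duration min_duration audio_pre audio_post sps (some m) fuel current segment_count pairs
      = pairs ++ List.take (m - segment_count).toNat
          ((gtpCand duration sps fuel current).filterMap
            (gtpPair duration min_duration audio_pre audio_post sps)) := by
  intro fuel
  induction fuel with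
  | zero => intro current segment_count pairs; simp [gtpLoopA, gtpCand]
  | succ n ih =>
    intro current segment_count pairs
    by_cases h : current * sps < duration
    · by_cases hb : segment_count ≥ m
      · have : (m - segment_count).toNat = 0 := by omega
        simp [gtpLoopA, h, hb, this]
      · by_cases hq : min ((current + 1) * sps) duration - current * sps ≥ min_duration
        · have htn : (m - segment_count).toNat = (m - (segment_count + 1)).toNat + 1 := by omega
          simp [gtpLoopA, gtpCand, gtpPair, gtpBuild, h, hb, hq, ih, htn, List.take_succ_cons]
        · simp [gtpLoopA, gtpCand, gtpPair, h, hb, hq, ih]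
    · simp [gtpLoopA, gtpCand, h]

-- number of candidate indices from `current` on, in closed form
def gtpN (duration : Int) (sps : Int) (current : Int) : Nat :=
  if duration ≤ current * sps then 0
  else (PySem.Int.floordiv (duration - current * sps) sps).toNat +
       (if PySem.Int.mod (duration - current * sps) sps = 0 then 0 else 1)

theorem gtpN_succ (duration sps current : Int) (hs : 0 < sps) (h : current * sps < duration) :
    gtpN duration sps current = gtpN duration sps (current + 1) + 1 := by
  have hX : 0 < duration - current * sps := by linarith
  set X := duration - current * sps with hXdef
  set q := PySem.Int.floordiv X sps with hqdef
  set r := PySem.Int.mod X sps with hrdef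
  have hqr : q * sps + r = X := PySem.Int.floordiv_mul_add_mod X sps
  have hr0 : 0 ≤ r := PySem.Int.mod_nonneg X hs
  have hrlt : r < sps := PySem.Int.mod_lt X hs
  have hX' : duration - (current + 1) * sps = X - sps := by rw [hXdef]; ring
  have hfd : PySem.Int.floordiv (X - sps) sps = q - 1 := by
    rw [PySem.Int.floordiv_eq_iff_of_pos hs]
    constructor <;> nlinarith
  have hmd : PySem.Int.mod (X - sps) sps = r := by
    have h2 := PySem.Int.floordiv_mul_add_mod (X - sps) sps
    rw [hfd] at h2; nlinarith
  have hcond : (duration ≤ (current + 1) * sps) = (X ≤ sps) := by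
    apply propext; constructor <;> intro hh <;> linarith
  simp only [gtpN, hX', hcond, hfd, hmd, if_neg (not_le.mpr h), ← hXdef, ← hqdef, ← hrdef]
  by_cases hrz : r = 0
  · have hq1 : 1 ≤ q := by nlinarith
    by_cases hXs : X ≤ sps
    · have hqle : q ≤ 1 := by nlinarith
      simp only [hrz, hXs, if_pos]
      omega
    · have hq2 : 2 ≤ q := by nlinarith
      simp only [hrz, if_neg hXs, if_pos]
      omega
  · have hrpos : 0 < r := lt_of_le_of_ne hr0 (Ne.symm hrz)
    by_cases hXs : X ≤ sps
    · have hqz : q ≤ 0 := by nlinarith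
      simp only [if_neg hrz, hXs, if_pos]
      omega
    · have hq1 : 1 ≤ q := by nlinarith
      simp only [if_neg hrz, if_neg hXs]
      omega

theorem gtpCand_eq (duration sps : Int) (hs : 0 < sps) :
    ∀ (fuel : Nat) (current : Int), (duration - current * sps).toNat < fuel →
    gtpCand duration sps fuel current
      = (List.range (gtpN duration sps current)).map (fun (i : Nat) => current + (i : Int)) := by
  intro fuel
  induction fuel with
  | zero => intro current hlt; exact absurd hlt (Nat.not_lt_zero _)
  | succ n ih =>
    intro current hlt
    by_cases h : current * sps < duration
    · have hstep := gtpN_succ duration sps current hs h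
      have hX1 : 0 < duration - current * sps := by linarith
      have hX' : duration - (current + 1) * sps = (duration - current * sps) - sps := by ring
      have hih : (duration - (current + 1) * sps).toNat < n := by
        rw [hX']
        generalize hg : duration - current * sps = X at hX1 hlt
        omega
      rw [show gtpCand duration sps (n + 1) current
            = current :: gtpCand duration sps n (current + 1) from by simp [gtpCand, h]]
      rw [ih (current + 1) hih, hstep, List.range_succ_eq_map]
      simp only [List.map_cons, List.map_map, Nat.cast_zero, add_zero]
      congr 1
      apply List.map_congr_left
      intro i _
      simp only [Function.comp_apply, Nat.succ_eq_add_one]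
      push_cast
      ring
    · have hle : duration ≤ current * sps := not_lt.mp h
      simp [gtpCand, gtpN, h, hle]

-- core: filterMap gtpPair over the candidates = B's kept index list mapped through gtpBuild
theorem gtp_core (duration start min_duration audio_pre audio_post sps : Int)
    (hs : 0 < sps) (hX : 0 < duration - start * sps) :
    ((List.range (gtpN duration sps start)).map (fun (i : Nat) => start + (i : Int))).filterMap
        (gtpPair duration min_duration audio_pre audio_post sps)
      = ((if sps ≥ min_duration then
            (List.range (PySem.Int.floordiv (duration - start * sps) sps).toNat).map
              (fun (i : Nat) => start + (i : Int)) else []) ++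
         (if PySem.Int.mod (duration - start * sps) sps ≠ 0 ∧
             PySem.Int.mod (duration - start * sps) sps ≥ min_duration then
            [start + PySem.Int.floordiv (duration - start * sps) sps] else [])).map
          (gtpBuild duration audio_pre audio_post sps) := by
  set X := duration - start * sps with hXdef
  set q := PySem.Int.floordiv X sps with hqdef
  set r := PySem.Int.mod X sps with hrdef
  have hqr : q * sps + r = X := PySem.Int.floordiv_mul_add_mod X sps
  have hr0 : 0 ≤ r := PySem.Int.mod_nonneg X hs
  have hrlt : r < sps := PySem.Int.mod_lt X hs
  have hq0 : 0 ≤ q := by nlinarith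
  have hNn : gtpN duration sps start = q.toNat + (if r = 0 then 0 else 1) := by
    have hlt : ¬ duration ≤ start * sps := not_le.mpr (by linarith)
    simp only [gtpN, if_neg hlt, ← hXdef, ← hqdef, ← hrdef]
  have hfull : ∀ c ∈ (List.range q.toNat).map (fun (i : Nat) => start + (i : Int)),
      gtpPair duration min_duration audio_pre audio_post sps c
        = (if sps ≥ min_duration then
            some (gtpBuild duration audio_pre audio_post sps c) else none) := by
    intro c hc
    simp only [List.mem_map, List.mem_range] at hc
    obtain ⟨i, hi, rfl⟩ := hc
    have hiq : (i : Int) + 1 ≤ q := by omega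
    have hmul : ((i : Int) + 1) * sps ≤ q * sps :=
      mul_le_mul_of_nonneg_right hiq (le_of_lt hs)
    have hexp : (start + (i : Int) + 1) * sps = start * sps + ((i : Int) + 1) * sps := by ring
    have hle : (start + (i : Int) + 1) * sps ≤ duration := by
      have hXeq : X = duration - start * sps := hXdef
      linarith
    have hmin : min ((start + (i : Int) + 1) * sps) duration = (start + (i : Int) + 1) * sps :=
      min_eq_left hle
    have hlen : (start + (i : Int) + 1) * sps - (start + (i : Int)) * sps = sps := by ring
    simp only [gtpPair, hmin, hlen]
  have hfirst : ((List.range q.toNat).map (fun (i : Nat) => start + (i : Int))).filterMap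
        (gtpPair duration min_duration audio_pre audio_post sps)
      = ((if sps ≥ min_duration then
            (List.range q.toNat).map (fun (i : Nat) => start + (i : Int)) else [])).map
          (gtpBuild duration audio_pre audio_post sps) := by
    by_cases hmd : sps ≥ min_duration
    · rw [if_pos hmd,
        List.filterMap_congr (g := some ∘ gtpBuild duration audio_pre audio_post sps)
          (fun c hc => by rw [hfull c hc, if_pos hmd]; rfl)]
      rw [List.filterMap_eq_map]
    · rw [if_neg hmd]
      simp only [List.map_nil]
      exact List.filterMap_eq_nil_iff.mpr (fun c hc => by rw [hfull c hc, if_neg hmd])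
  by_cases hrz : r = 0
  · rw [hNn]
    rw [if_neg (show ¬(r ≠ 0 ∧ r ≥ min_duration) by simp [hrz])]
    rw [List.append_nil]
    simpa [hrz] using hfirst
  · have hrpos : 0 < r := lt_of_le_of_ne hr0 (Ne.symm hrz)
    rw [hNn]
    simp only [if_neg hrz]
    rw [List.range_succ, List.map_append, List.filterMap_append, List.map_append, hfirst]
    congr 1
    have hcast : ((q.toNat : Nat) : Int) = q := Int.toNat_of_nonneg hq0
    have hexp : (start + q + 1) * sps = start * sps + q * sps + sps := by ring
    have hge : duration ≤ (start + q + 1) * sps := by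
      have hXeq : X = duration - start * sps := hXdef
      linarith
    have hmin : min ((start + q + 1) * sps) duration = duration := min_eq_right hge
    have hexp2 : (start + q) * sps = start * sps + q * sps := by ring
    have hlen : duration - (start + q) * sps = r := by
      have hXeq : X = duration - start * sps := hXdef
      linarith
    have hpartial : gtpPair duration min_duration audio_pre audio_post sps (start + q)
        = (if r ≥ min_duration then
            some (gtpBuild duration audio_pre audio_post sps (start + q)) else none) := by
      simp only [gtpPair, hmin, hlen]
    simp only [List.map_cons, List.map_nil, hcast, List.filterMap_cons, List.filterMap_nil,
      hpartial]
    by_cases hrmd : r ≥ min_duration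
    · simp [hrmd, hrz]
    · simp [hrmd, hrz]

-- taking n of (list ++ optional singleton) keeps the prefix and the singleton only if room remains
theorem gtp_take {α : Type} (A : List α) (x : α) (P : Prop) [Decidable P] (n : Nat) :
    List.take n (A ++ (if P then [x] else []))
      = List.take n A ++ (if P ∧ A.length < n then [x] else []) := by
  rw [List.take_append]
  congr 1
  by_cases hP : P
  · by_cases hl : A.length < n
    · rw [if_pos hP, if_pos ⟨hP, hl⟩]
      exact List.take_of_length_le (by simp; omega)
    · rw [if_pos hP, if_neg (by tauto)]
      have h0 : n - A.length = 0 := by omega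
      simp [h0]
  · simp [hP]

-- ===== VERDICT =====
theorem generate_time_pairs_spec : Claim_equal_generate_time_pairs := by
  intro duration start md ap po sps ms _ hpre
  simp only [Spec_generate_time_pairs, generate_time_pairs]
  by_cases hsp : duration - start * sps ≤ 0
  · have hc : ¬ start * sps < duration := not_lt.mpr (by linarith)
    simp [generate_time_pairs_alt, gtpLoopA, hc, hsp]
  · have hX : 0 < duration - start * sps := by linarith
    have hs : 0 < sps := by
      rcases hpre with h | h
      · exact h
      · exact absurd h (not_le.mpr (by linarith))
    have hcand := gtpCand_eq duration sps hs ((duration - start * sps).toNat + 1) start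
      (Nat.lt_succ_self _)
    have hcore := gtp_core duration start md ap po sps hs hX
    have hqr := PySem.Int.floordiv_mul_add_mod (duration - start * sps) sps
    have hr0 := PySem.Int.mod_nonneg (duration - start * sps) hs
    have hrlt := PySem.Int.mod_lt (duration - start * sps) hs
    have hq0 : 0 ≤ PySem.Int.floordiv (duration - start * sps) sps := by nlinarith
    cases ms with
    | none =>
      simp only [generate_time_pairs_alt]
      rw [if_neg hsp, gtpLoopA_none, hcand, hcore]
      by_cases hmd : sps ≥ md <;>
        by_cases hp : (PySem.Int.mod (duration - start * sps) sps ≠ 0 ∧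
            PySem.Int.mod (duration - start * sps) sps ≥ md) <;>
          simp [hmd, hp]
    | some m =>
      simp only [generate_time_pairs_alt]
      rw [if_neg hsp, gtpLoopA_some, hcand, hcore, Int.sub_zero, ← List.map_take, gtp_take]
      have e1 : min m.toNat (PySem.Int.floordiv (duration - start * sps) sps).toNat
          = (min (PySem.Int.floordiv (duration - start * sps) sps) (max 0 m)).toNat := by omega
      have e2 : ((PySem.Int.floordiv (duration - start * sps) sps).toNat < m.toNat)
          ↔ (min (PySem.Int.floordiv (duration - start * sps) sps) (max 0 m) < max 0 m) := by
        omega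
      have e3 : (min (0 : Int) (max 0 m)).toNat = 0 := by omega
      have e4 : min (0 : Int) (max 0 m) = 0 := by omega
      have e5 : ((0 : Nat) < m.toNat) ↔ ((0 : Int) < max 0 m) := by omega
      by_cases hmd : sps ≥ md
      · by_cases hp : (PySem.Int.mod (duration - start * sps) sps ≠ 0 ∧
            PySem.Int.mod (duration - start * sps) sps ≥ md)
        · simp only [hmd, hp, if_true, List.length_map, List.length_range, List.map_append,
            ← List.map_take, List.take_range]
          simp [e1, e2, hp.1]
        · simp only [hmd, hp, if_true, List.length_map, List.length_range,
            List.map_append, ← List.map_take, List.take_range]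
          simp [e1]
      · by_cases hp : (PySem.Int.mod (duration - start * sps) sps ≠ 0 ∧
            PySem.Int.mod (duration - start * sps) sps ≥ md)
        · simp only [hmd, hp, if_false, List.length_nil, List.map_append,
            List.take_nil]
          simp [e4, e5, hp.1]
        · simp only [hmd, hp, if_false, List.length_nil, List.map_append, List.take_nil]
          simp
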